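-- pv_equiv track=rewrite | github.com/t0mt0mm/ecu-test | dbc_overlap_fixer_gui.py | motorola_positions
-- ===== SOURCE A (Python) =====
-- from typing import Dict, List, Optional, Set, Tuple
--
-- def motorola_positions(start: int, length: int, max_bits: int) -> Optional[List[int]]:
--     pos = []
--     bit = start
--     for _ in range(length):
--         if bit < 0 or bit >= max_bits:
--             return None
--         pos.append(bit)
--         if bit % 8 == 0:
--             bit += 15
--         else:
--             bit -= 1
--     return pos
-- ===== SOURCE B (Python) =====
-- def motorola_positions(start: int, length: int, max_bits: int):
--     s = (start // 8) * 8 + 7 - start % 8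
--     if any(not (0 <= ((s + i) // 8) * 8 + 7 - (s + i) % 8 < max_bits) for i in range(length)):
--         return None
--     return [((s + i) // 8) * 8 + 7 - (s + i) % 8 for i in range(length)]
-- ===== Notes on version B (the rewrite author's own statement) =====
-- stated objective: alternative
-- what changed: Replaces A's single-pass stateful recurrence (running bit updated by a mod-8 branch, early return on the first bad bit) with two staged passes over a closed-form per-index formula: start is mapped to a continuous index s, a short-circuiting validation pass checks every mirrored position s+i, then a second pass builds the list.
import Mathlib
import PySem

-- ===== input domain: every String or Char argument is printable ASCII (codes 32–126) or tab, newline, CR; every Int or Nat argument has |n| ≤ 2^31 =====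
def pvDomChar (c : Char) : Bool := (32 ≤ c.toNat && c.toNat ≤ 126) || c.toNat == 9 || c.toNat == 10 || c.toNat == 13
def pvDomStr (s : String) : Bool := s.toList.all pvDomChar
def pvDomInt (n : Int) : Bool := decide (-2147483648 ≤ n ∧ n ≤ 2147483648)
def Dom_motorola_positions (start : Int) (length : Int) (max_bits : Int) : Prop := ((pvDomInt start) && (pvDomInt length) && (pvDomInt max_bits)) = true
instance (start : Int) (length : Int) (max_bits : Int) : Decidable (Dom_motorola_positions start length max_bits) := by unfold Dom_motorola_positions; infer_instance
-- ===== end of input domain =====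

-- B replaces A's stateful single-pass recurrence (running bit, mod-8 branch, early return) by two
-- staged passes over a closed-form per-index formula: a lazy validation pass, then a map; objective: alternative.

-- ===== PORT A =====
-- the for-loop of A: n = remaining iterations, bit = running bit, pos = reversed accumulator (cons + final reverse keeps evaluation linear)
def motorolaA_loop (max_bits : Int) : Nat → Int → List Int → Option (List Int)
  | 0, _, pos => some pos
  | n + 1, bit, pos =>
    if bit < 0 ∨ max_bits ≤ bit then none
    else motorolaA_loop max_bits n (if PySem.Int.mod bit 8 = 0 then bit + 15 else bit - 1) (bit :: pos)

def motorola_positions (start : Int) (length : Int) (max_bits : Int) : Option (List Int) :=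
  (motorolaA_loop max_bits length.toNat start []).map List.reverse

-- ===== PORT B =====
-- B's lazy `any(... for i in range(length))`: n = remaining indices, i = current index; stops at the first bad position like the Python generator
def motorolaB_scan (s : Int) (max_bits : Int) : Nat → Nat → Bool
  | 0, _ => false
  | n + 1, i =>
    if !(decide (0 ≤ PySem.Int.floordiv (s + (i : Int)) 8 * 8 + 7 - PySem.Int.mod (s + (i : Int)) 8)
         && decide (PySem.Int.floordiv (s + (i : Int)) 8 * 8 + 7 - PySem.Int.mod (s + (i : Int)) 8 < max_bits))
    then true
    else motorolaB_scan s max_bits n (i + 1)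

def motorola_positions_alt (start : Int) (length : Int) (max_bits : Int) : Option (List Int) :=
  let s := PySem.Int.floordiv start 8 * 8 + 7 - PySem.Int.mod start 8
  if motorolaB_scan s max_bits length.toNat 0
  then none
  else some ((List.range length.toNat).map (fun i : Nat =>
      PySem.Int.floordiv (s + (i : Int)) 8 * 8 + 7 - PySem.Int.mod (s + (i : Int)) 8))

-- ===== PRECONDITION & SPEC =====
def Spec_motorola_positions (start : Int) (length : Int) (max_bits : Int) (out : Option (List Int)) : Prop := out = motorola_positions_alt start length max_bits
instance (start : Int) (length : Int) (max_bits : Int) (out : Option (List Int)) : Decidable (Spec_motorola_positions start length max_bits out) := by unfold Spec_motorola_positions; infer_instance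

-- ===== CLAIM (what is proved, stated in full; the proofs are below) =====
def Claim_equal_motorola_positions : Prop := ∀ (start : Int) (length : Int) (max_bits : Int), Dom_motorola_positions start length max_bits → Spec_motorola_positions start length max_bits (motorola_positions start length max_bits)

-- ===== LEMMAS AND PROOFS =====

-- the byte-mirroring map B computes at each index
def pvMirror (x : Int) : Int := PySem.Int.floordiv x 8 * 8 + 7 - PySem.Int.mod x 8

lemma pvMirror_canon (q r : Int) (h0 : 0 ≤ r) (h8 : r < 8) :
    pvMirror (8 * q + r) = 8 * q + (7 - r) := by
  have hdiv : PySem.Int.floordiv (8 * q + r) 8 = q := by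
    rw [PySem.Int.floordiv_eq_iff_of_pos (by omega)]; omega
  have hmod := PySem.Int.floordiv_mul_add_mod (8 * q + r) 8
  rw [hdiv] at hmod
  unfold pvMirror
  rw [hdiv]
  omega

lemma pvMirror_decomp (x : Int) :
    ∃ q r, x = 8 * q + r ∧ 0 ≤ r ∧ r < 8 := by
  refine ⟨PySem.Int.floordiv x 8, PySem.Int.mod x 8, ?_,
    PySem.Int.mod_nonneg x (by omega), PySem.Int.mod_lt x (by omega)⟩
  have := PySem.Int.floordiv_mul_add_mod x 8
  omega

lemma pvMirror_invol (x : Int) : pvMirror (pvMirror x) = x := by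
  obtain ⟨q, r, rfl, h0, h8⟩ := pvMirror_decomp x
  rw [pvMirror_canon q r h0 h8, pvMirror_canon q (7 - r) (by omega) (by omega)]
  omega

-- A's step is B's continuous-index successor pulled back through the mirror
lemma pvStep_eq (bit : Int) :
    (if PySem.Int.mod bit 8 = 0 then bit + 15 else bit - 1) = pvMirror (pvMirror bit + 1) := by
  obtain ⟨q, r, rfl, h0, h8⟩ := pvMirror_decomp bit
  have hmod : PySem.Int.mod (8 * q + r) 8 = r := by
    have hdiv : PySem.Int.floordiv (8 * q + r) 8 = q := by
      rw [PySem.Int.floordiv_eq_iff_of_pos (by omega)]; omega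
    have := PySem.Int.floordiv_mul_add_mod (8 * q + r) 8
    rw [hdiv] at this; omega
  rw [pvMirror_canon q r h0 h8, hmod]
  by_cases hr : r = 0
  · subst hr
    rw [if_pos rfl]
    have h1 : (8 * q + (7 - 0) + 1 : Int) = 8 * (q + 1) + 0 := by ring
    rw [h1, pvMirror_canon (q + 1) 0 (by omega) (by omega)]
    omega
  · rw [if_neg hr]
    have h1 : (8 * q + (7 - r) + 1 : Int) = 8 * q + (8 - r) := by ring
    rw [h1, pvMirror_canon q (8 - r) (by omega) (by omega)]
    omega

-- characterisation of A's loop by B's staged computation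
lemma loopA_char (max_bits : Int) :
    ∀ (n : Nat) (bit s : Int) (pos : List Int), s = pvMirror bit →
      motorolaA_loop max_bits n bit pos =
        (if ((List.range n).map (fun i : Nat => pvMirror (s + (i : Int)))).any
              (fun b => decide (b < 0) || decide (max_bits ≤ b))
         then none
         else some (((List.range n).map (fun i : Nat => pvMirror (s + (i : Int)))).reverse ++ pos)) := by
  intro n
  induction n with
  | zero => intro bit s pos _; simp [motorolaA_loop]
  | succ n ih =>
    intro bit s pos h
    have hbit : pvMirror s = bit := by rw [h, pvMirror_invol]
    have hrange : (List.range (n + 1)).map (fun i : Nat => pvMirror (s + (i : Int)))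
        = bit :: (List.range n).map (fun i : Nat => pvMirror ((s + 1) + (i : Int))) := by
      rw [List.range_succ_eq_map, List.map_cons, List.map_map]
      refine congrArg₂ _ (by simpa using hbit) (List.map_congr_left ?_)
      intro i _
      simp only [Function.comp]
      congr 1
      push_cast
      ring
    rw [hrange]
    simp only [motorolaA_loop, List.any_cons]
    by_cases hb : bit < 0 ∨ max_bits ≤ bit
    · rw [if_pos hb]
      have hbad : (decide (bit < 0) || decide (max_bits ≤ bit)) = true := by
        rcases hb with h1 | h1 <;> simp [h1]
      simp [hbad]
    · rw [if_neg hb]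
      have h1 : ¬ bit < 0 := fun h' => hb (Or.inl h')
      have h2 : ¬ max_bits ≤ bit := fun h' => hb (Or.inr h')
      have hbad : (decide (bit < 0) || decide (max_bits ≤ bit)) = false := by simp [h1, h2]
      rw [ih _ (s + 1) (bit :: pos) (by rw [pvStep_eq, pvMirror_invol, ← h])]
      simp [hbad]

-- ===== VERDICT (by name: the statement is the Claim_ definition above) =====
-- the fused scan equals `any` over the mapped range
lemma scan_eq (s max_bits : Int) :
    ∀ (n i : Nat), motorolaB_scan s max_bits n i =
      (List.range n).any (fun j : Nat =>
        !(decide (0 ≤ PySem.Int.floordiv (s + ((i + j : Nat) : Int)) 8 * 8 + 7 - PySem.Int.mod (s + ((i + j : Nat) : Int)) 8)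
          && decide (PySem.Int.floordiv (s + ((i + j : Nat) : Int)) 8 * 8 + 7 - PySem.Int.mod (s + ((i + j : Nat) : Int)) 8 < max_bits))) := by
  intro n
  induction n with
  | zero => intro i; simp [motorolaB_scan]
  | succ n ih =>
    intro i
    rw [List.range_succ_eq_map]
    simp only [motorolaB_scan, List.any_cons, List.any_map, Function.comp_def]
    rw [ih (i + 1)]
    have harg : ∀ j : Nat, i + 1 + j = i + (j + 1) := by omega
    by_cases hbad : (decide (0 ≤ PySem.Int.floordiv (s + (i : Int)) 8 * 8 + 7 - PySem.Int.mod (s + (i : Int)) 8)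
         && decide (PySem.Int.floordiv (s + (i : Int)) 8 * 8 + 7 - PySem.Int.mod (s + (i : Int)) 8 < max_bits)) = true
    · simp only [hbad, Nat.add_zero]
      simp only [harg]
      simp
    · have hbad' : (decide (0 ≤ PySem.Int.floordiv (s + (i : Int)) 8 * 8 + 7 - PySem.Int.mod (s + (i : Int)) 8)
         && decide (PySem.Int.floordiv (s + (i : Int)) 8 * 8 + 7 - PySem.Int.mod (s + (i : Int)) 8 < max_bits)) = false :=
        Bool.eq_false_iff.mpr hbad
      simp only [hbad', Nat.add_zero]
      simp

theorem motorola_positions_spec : Claim_equal_motorola_positions := by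
  intro start length max_bits _
  unfold Spec_motorola_positions motorola_positions motorola_positions_alt
  rw [loopA_char max_bits length.toNat start (pvMirror start) [] rfl]
  simp only [scan_eq, pvMirror, List.any_map, Function.comp_def, Nat.zero_add]
  have hcond : ∀ b : Int, (decide (b < 0) || decide (max_bits ≤ b))
      = !(decide (0 ≤ b) && decide (b < max_bits)) := by
    intro b
    by_cases h1 : b < 0 <;> by_cases h2 : max_bits ≤ b <;> simp_all
  simp only [hcond]
  split
  · simp
  · simp
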